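-- pv_equiv track=rewrite | github.com/GustavoHFMO/IDPSO-ELM-S | metricas/Metricas_deteccao.py | resultados_dow_drift
-- ===== SOURCE A (Python) =====
-- def resultados_dow_drift(lista, n):
--     '''
--     Metodo para computar os falsos_alarmes, atrasos e a porcentagem de falta de deteccao da serie Down Jones Industrial Average
--     :param lista: lista com os indices de todas as deteccoes encontradas
--     :return: retorna uma lista com os seguintes valores [falsos_alarmes, atrasos, porcentagem_falta_deteccao]
--     '''
--
--     atrasos_lista = [183, 203, 224]
--     deteccoes = [124 - n,
--                 307 - n,
--                 510 - n]
--
--     falsos_alarmes = 0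
--     atrasos = 0
--     increment = 1
--     auxiliar = [False] * len(deteccoes)
--
--     for i in range(len(lista)):
--         # x < 124
--         if(lista[i] < deteccoes[0]):
--             falsos_alarmes += increment
--
--         # x >= 124 e x < 307
--         elif(lista[i] >= deteccoes[0] and lista[i] < deteccoes[1]):
--
--             if(auxiliar[0] == True):
--                 falsos_alarmes += increment
--
--             if(auxiliar[0] == False):
--                 atrasos = atrasos + lista[i] - deteccoes[0]
--                 auxiliar[0] = True
--
--
--         # x >= 307 e x < 510
--         elif(lista[i] >= deteccoes[1] and lista[i] < deteccoes[2]):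
--
--             if(auxiliar[1] == True):
--                 falsos_alarmes += increment
--
--             if(auxiliar[1] == False):
--                 atrasos = atrasos + lista[i] - deteccoes[1]
--                 auxiliar[1] = True
--
--         # x >= 510
--         elif(lista[i] >= deteccoes[2]):
--
--             if(auxiliar[2] == True):
--                 falsos_alarmes += increment
--
--             if(auxiliar[2] == False):
--                 atrasos = atrasos + lista[i] - deteccoes[2]
--                 auxiliar[2] = True
--
--
--     for i in range(len(auxiliar)):
--         if(auxiliar[i] == False):
--             atrasos += atrasos_lista[i]
--
--     return falsos_alarmes, atrasos
-- ===== SOURCE B (Python) =====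
-- def resultados_dow_drift(lista, n):
--     atrasos_lista = [183, 203, 224]
--     deteccoes = [124 - n, 307 - n, 510 - n]
--     bounds = [(deteccoes[0], deteccoes[1]), (deteccoes[1], deteccoes[2]), (deteccoes[2], None)]
--     firsts = [next((x for x in lista if lo <= x and (hi is None or x < hi)), None)
--               for (lo, hi) in bounds]
--     detected = sum(1 for f in firsts if f is not None)
--     falsos_alarmes = len(lista) - detected
--     atrasos = sum((f - deteccoes[k]) if f is not None else atrasos_lista[k]
--                   for k, f in enumerate(firsts))
--     return falsos_alarmes, atrasos
-- ===== Notes on version B (the rewrite author's own statement) =====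
-- stated objective: simpler
-- what changed: Replaces A's stateful single pass with mutable flags by a region-wise decomposition: find the first element of each of the three detection regions, then compute false alarms as len(lista) - regions-fired and delays from those first elements.
import Mathlib
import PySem

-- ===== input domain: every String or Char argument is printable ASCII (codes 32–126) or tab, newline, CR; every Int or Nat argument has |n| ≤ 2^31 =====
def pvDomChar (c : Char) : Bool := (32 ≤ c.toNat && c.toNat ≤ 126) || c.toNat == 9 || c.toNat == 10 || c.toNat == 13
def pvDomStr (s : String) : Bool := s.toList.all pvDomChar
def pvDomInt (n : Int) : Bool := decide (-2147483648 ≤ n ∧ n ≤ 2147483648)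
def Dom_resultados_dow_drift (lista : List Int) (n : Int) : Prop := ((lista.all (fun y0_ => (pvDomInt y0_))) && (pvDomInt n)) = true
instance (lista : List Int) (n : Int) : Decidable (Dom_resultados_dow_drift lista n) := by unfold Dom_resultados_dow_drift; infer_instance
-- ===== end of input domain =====

-- B replaces A's stateful single pass (flags per region) by per-region first-element lookup; objective: simpler.

-- ===== PORT A =====
-- one step of A's loop body over state (falsos_alarmes, atrasos, auxiliar[0], auxiliar[1], auxiliar[2])
def pvStepA (d0 d1 d2 : Int) (st : Int × Int × Bool × Bool × Bool) (x : Int) :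
    Int × Int × Bool × Bool × Bool :=
  let (fa, at_, a0, a1, a2) := st
  if x < d0 then
    (fa + 1, at_, a0, a1, a2)
  else if d0 ≤ x ∧ x < d1 then
    if a0 then (fa + 1, at_, a0, a1, a2) else (fa, at_ + x - d0, true, a1, a2)
  else if d1 ≤ x ∧ x < d2 then
    if a1 then (fa + 1, at_, a0, a1, a2) else (fa, at_ + x - d1, a0, true, a2)
  else if d2 ≤ x then
    if a2 then (fa + 1, at_, a0, a1, a2) else (fa, at_ + x - d2, a0, a1, true)
  else
    (fa, at_, a0, a1, a2)

def resultados_dow_drift (lista : List Int) (n : Int) : Int × Int :=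
  let d0 := 124 - n
  let d1 := 307 - n
  let d2 := 510 - n
  let r := lista.foldl (pvStepA d0 d1 d2) (0, 0, false, false, false)
  let fa := r.1
  let at0 := r.2.1
  -- final loop over auxiliar (length 3), adding atrasos_lista[i] for unfired regions
  let at1 := if r.2.2.1 then at0 else at0 + 183
  let at2 := if r.2.2.2.1 then at1 else at1 + 203
  let at3 := if r.2.2.2.2 then at2 else at2 + 224
  (fa, at3)

-- ===== PORT B =====
-- region membership predicates (half-open; last unbounded above)
def pvReg0 (d0 d1 : Int) (x : Int) : Bool := decide (d0 ≤ x ∧ x < d1)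
def pvReg1 (d1 d2 : Int) (x : Int) : Bool := decide (d1 ≤ x ∧ x < d2)
def pvReg2 (d2 : Int) (x : Int) : Bool := decide (d2 ≤ x)

def resultados_dow_drift_alt (lista : List Int) (n : Int) : Int × Int :=
  let d0 := 124 - n
  let d1 := 307 - n
  let d2 := 510 - n
  let f0 := lista.find? (pvReg0 d0 d1)
  let f1 := lista.find? (pvReg1 d1 d2)
  let f2 := lista.find? (pvReg2 d2)
  let detected : Int :=
    (if f0.isSome then 1 else 0) + (if f1.isSome then 1 else 0) + (if f2.isSome then 1 else 0)
  let falsos := (lista.length : Int) - detected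
  let atrasos :=
    (match f0 with | some x => x - d0 | none => 183)
    + (match f1 with | some x => x - d1 | none => 203)
    + (match f2 with | some x => x - d2 | none => 224)
  (falsos, atrasos)

-- ===== PRECONDITION & SPEC =====
def Spec_resultados_dow_drift (lista : List Int) (n : Int) (out : Int × Int) : Prop := out = resultados_dow_drift_alt lista n
instance (lista : List Int) (n : Int) (out : Int × Int) : Decidable (Spec_resultados_dow_drift lista n out) := by unfold Spec_resultados_dow_drift; infer_instance

-- ===== CLAIM (what is proved, stated in full; the proofs are below) =====
def Claim_equal_resultados_dow_drift : Prop := ∀ (lista : List Int) (n : Int), Dom_resultados_dow_drift lista n → Spec_resultados_dow_drift lista n (resultados_dow_drift lista n)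

-- ===== LEMMAS AND PROOFS =====

-- contribution of a region to false alarms: its first unclaimed element is not a false alarm
def pvC (a : Bool) (o : Option Int) : Int := if a then 0 else if o.isSome then 1 else 0
-- contribution of a region to delays during the main loop
def pvS (a : Bool) (d : Int) (o : Option Int) : Int :=
  if a then 0 else match o with | some x => x - d | none => 0

theorem pvFoldA_eq (d0 d1 d2 : Int) (h01 : d0 < d1) (h12 : d1 < d2) :
    ∀ (l : List Int) (fa at_ : Int) (a0 a1 a2 : Bool),
    List.foldl (pvStepA d0 d1 d2) (fa, at_, a0, a1, a2) l =
      (fa + l.length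
         - pvC a0 (l.find? (pvReg0 d0 d1))
         - pvC a1 (l.find? (pvReg1 d1 d2))
         - pvC a2 (l.find? (pvReg2 d2)),
       at_ + pvS a0 d0 (l.find? (pvReg0 d0 d1))
           + pvS a1 d1 (l.find? (pvReg1 d1 d2))
           + pvS a2 d2 (l.find? (pvReg2 d2)),
       a0 || (l.find? (pvReg0 d0 d1)).isSome,
       a1 || (l.find? (pvReg1 d1 d2)).isSome,
       a2 || (l.find? (pvReg2 d2)).isSome) := by
  intro l
  induction l with
  | nil =>
      intro fa at_ a0 a1 a2
      simp [pvC, pvS]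
  | cons x xs ih =>
      intro fa at_ a0 a1 a2
      by_cases hx0 : x < d0
      · have e0 : pvReg0 d0 d1 x = false := by simp [pvReg0]; omega
        have e1 : pvReg1 d1 d2 x = false := by simp [pvReg1]; omega
        have e2 : pvReg2 d2 x = false := by simp [pvReg2]; omega
        simp only [List.foldl_cons, List.find?_cons, e0, e1, e2, pvStepA, if_pos hx0]
        rw [ih]
        refine Prod.ext ?_ rfl
        simp; omega
      · by_cases hx1 : x < d1
        · have e0 : pvReg0 d0 d1 x = true := by simp [pvReg0]; omega
          have e1 : pvReg1 d1 d2 x = false := by simp [pvReg1]; omega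
          have e2 : pvReg2 d2 x = false := by simp [pvReg2]; omega
          simp only [List.foldl_cons, List.find?_cons, e0, e1, e2, pvStepA, if_neg hx0]
          rw [if_pos (by constructor <;> omega)]
          cases a0 with
          | false =>
              simp only [Bool.false_eq_true, if_neg (by simp : ¬ (false = true))]
              rw [ih]
              simp [pvC, pvS]; constructor
              · omega
              · ring
          | true =>
              simp only [if_pos rfl]
              rw [ih]
              simp [pvC, pvS]; omega
        · by_cases hx2 : x < d2
          · have e0 : pvReg0 d0 d1 x = false := by simp [pvReg0]; omega
            have e1 : pvReg1 d1 d2 x = true := by simp [pvReg1]; omega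
            have e2 : pvReg2 d2 x = false := by simp [pvReg2]; omega
            simp only [List.foldl_cons, List.find?_cons, e0, e1, e2, pvStepA, if_neg hx0]
            rw [if_neg (by omega), if_pos (by constructor <;> omega)]
            cases a1 with
            | false =>
                simp only [Bool.false_eq_true, if_neg (by simp : ¬ (false = true))]
                rw [ih]
                simp [pvC, pvS]; constructor
                · omega
                · ring
            | true =>
                simp only [if_pos rfl]
                rw [ih]
                simp [pvC, pvS]; omega
          · have e0 : pvReg0 d0 d1 x = false := by simp [pvReg0]; omega
            have e1 : pvReg1 d1 d2 x = false := by simp [pvReg1]; omega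
            have e2 : pvReg2 d2 x = true := by simp [pvReg2]; omega
            simp only [List.foldl_cons, List.find?_cons, e0, e1, e2, pvStepA, if_neg hx0]
            rw [if_neg (by omega), if_neg (by omega), if_pos (by omega)]
            cases a2 with
            | false =>
                simp only [Bool.false_eq_true, if_neg (by simp : ¬ (false = true))]
                rw [ih]
                simp [pvC, pvS]; constructor
                · omega
                · ring
            | true =>
                simp only [if_pos rfl]
                rw [ih]
                simp [pvC, pvS]; omega

-- ===== VERDICT (by name: the statement is the Claim_ definition above) =====
theorem resultados_dow_drift_spec : Claim_equal_resultados_dow_drift := by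
  intro lista n _
  unfold Spec_resultados_dow_drift resultados_dow_drift resultados_dow_drift_alt
  dsimp only
  rw [pvFoldA_eq (124 - n) (307 - n) (510 - n) (by omega) (by omega)]
  cases h0 : lista.find? (pvReg0 (124 - n) (307 - n)) <;>
  cases h1 : lista.find? (pvReg1 (307 - n) (510 - n)) <;>
  cases h2 : lista.find? (pvReg2 (510 - n)) <;>
  simp [pvC, pvS] <;> and_intros <;> first | ring | trivial
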